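-- pv_equiv track=rewrite | github.com/LorezoM/Corso_python | M1_A5.py | select_new_gen
-- ===== SOURCE A (Python) =====
-- POP_SIZE = 40 # The size of the population at the start of each iteration (keepthis even if you change it)
--
-- def select_new_gen(dogs):
--     dogs.sort(key=lambda x: -x[1])
--     female, male = [], []
--     for i in range(len(dogs)):
--         if (dogs[i][0] == 0) & (len(female) < POP_SIZE / 2):
--             female.append(dogs[i])
--         elif (len(male) < POP_SIZE / 2):
--             male.append(dogs[i])
--         elif ((len(male) == POP_SIZE / 2) & (len(female) == POP_SIZE / 2)):
--             break
--         else: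
--             pass
--     return(female,male)
-- ===== SOURCE B (Python) =====
-- POP_SIZE = 40 # The size of the population at the start of each iteration (keepthis even if you change it)
--
-- def _drop_females(xs, n):
--     # remove the first n females (sex == 0) from xs, keep everything else in order
--     out = []
--     for x in xs:
--         if n > 0 and x[0] == 0:
--             n -= 1
--         else:
--             out.append(x)
--     return out
--
-- def select_new_gen(dogs):
--     dogs.sort(key=lambda x: -x[1])
--     cap = POP_SIZE // 2
--     female = [d for d in dogs if d[0] == 0][:cap]
--     male = _drop_females(dogs, cap)[:cap]
--     return (female, male)
-- ===== Notes on version B (the rewrite author's own statement) =====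
-- stated objective: alternative
-- what changed: A's single indexed loop over the sorted list with four branches, two growing accumulators, length guards and a break is replaced by building each half independently and in closed style: female = first 20 of a filter comprehension, male = first 20 of the list obtained by deleting the first 20 females from the sorted list (a removal pass with a countdown, no length tests, no break).
import Mathlib
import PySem

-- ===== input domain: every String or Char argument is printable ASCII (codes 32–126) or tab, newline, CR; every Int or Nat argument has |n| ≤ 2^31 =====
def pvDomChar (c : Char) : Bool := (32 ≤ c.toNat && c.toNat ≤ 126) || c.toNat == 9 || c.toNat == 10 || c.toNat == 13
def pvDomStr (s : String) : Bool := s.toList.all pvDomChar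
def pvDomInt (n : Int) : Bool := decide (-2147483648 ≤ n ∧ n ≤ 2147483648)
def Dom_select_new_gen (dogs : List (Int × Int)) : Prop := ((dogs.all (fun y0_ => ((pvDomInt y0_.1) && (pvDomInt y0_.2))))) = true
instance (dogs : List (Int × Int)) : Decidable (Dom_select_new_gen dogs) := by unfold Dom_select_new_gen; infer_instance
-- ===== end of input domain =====

-- B builds the two halves independently (filter+take for females; delete-first-20-females then take for males) instead of A's four-way loop; equivalence is about the RETURN value (both Pythons sort `dogs` in place the same way).

-- ===== PORT A =====
-- A's for-loop over the sorted list: state (female, male); `POP_SIZE / 2` = 20.0 compared with int lengths, ported as the Nat bound 20.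
def pvLoopA : List (Int × Int) → List (Int × Int) → List (Int × Int) → (List (Int × Int)) × (List (Int × Int))
  | [], f, m => (f, m)
  | d :: t, f, m =>
    if d.1 = 0 ∧ f.length < 20 then pvLoopA t (f ++ [d]) m
    else if m.length < 20 then pvLoopA t f (m ++ [d])
    else if m.length = 20 ∧ f.length = 20 then (f, m)   -- break
    else pvLoopA t f m                                  -- pass

def select_new_gen (dogs : List (Int × Int)) : (List (Int × Int)) × (List (Int × Int)) :=
  let s := PySem.List.sorted dogs (fun x => -x.2) false
  pvLoopA s [] []

-- ===== PORT B =====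
-- Source B's `_drop_females`: delete the first n females from xs, keep everything else in order.
def pvDropFem : List (Int × Int) → Nat → List (Int × Int) → List (Int × Int)
  | [], _, out => out
  | x :: t, n, out =>
    if 0 < n ∧ x.1 = 0 then pvDropFem t (n - 1) out
    else pvDropFem t n (out ++ [x])

def select_new_gen_alt (dogs : List (Int × Int)) : (List (Int × Int)) × (List (Int × Int)) :=
  let s := PySem.List.sorted dogs (fun x => -x.2) false
  ((s.filter (fun d => d.1 == 0)).take 20, (pvDropFem s 20 []).take 20)

-- ===== PRECONDITION & SPEC =====
def Spec_select_new_gen (dogs : List (Int × Int)) (out : (List (Int × Int)) × (List (Int × Int))) : Prop := out = select_new_gen_alt dogs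
instance (dogs : List (Int × Int)) (out : (List (Int × Int)) × (List (Int × Int))) : Decidable (Spec_select_new_gen dogs out) := by unfold Spec_select_new_gen; infer_instance

-- ===== CLAIM (what is proved, stated in full; the proofs are below) =====
def Claim_equal_select_new_gen : Prop := ∀ (dogs : List (Int × Int)), Dom_select_new_gen dogs → Spec_select_new_gen dogs (select_new_gen dogs)

-- ===== LEMMAS AND PROOFS =====

lemma pvDropFem_out (l : List (Int × Int)) : ∀ (n : Nat) (out : List (Int × Int)),
    pvDropFem l n out = out ++ pvDropFem l n [] := by
  induction l with
  | nil => intro n out; simp [pvDropFem]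
  | cons x t ih =>
    intro n out
    simp only [pvDropFem]
    split_ifs with h
    · exact ih _ _
    · rw [ih _ (out ++ [x]), ih _ ([] ++ [x])]; simp

lemma pvLoopA_eq (l : List (Int × Int)) : ∀ (f m : List (Int × Int)),
    f.length ≤ 20 → m.length ≤ 20 →
    pvLoopA l f m =
      (f ++ (l.filter (fun d => d.1 == 0)).take (20 - f.length),
       m ++ (pvDropFem l (20 - f.length) []).take (20 - m.length)) := by
  induction l with
  | nil => intro f m _ _; simp [pvLoopA, pvDropFem]
  | cons d t ih =>
    intro f m hf hm
    simp only [pvLoopA]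
    by_cases h1 : d.1 = 0 ∧ f.length < 20
    · rw [if_pos h1, ih (f ++ [d]) m (by simp; omega) hm]
      have hdrop : pvDropFem (d :: t) (20 - f.length) [] = pvDropFem t (20 - (f.length + 1)) [] := by
        have : (0 < 20 - f.length ∧ d.1 = 0) := ⟨by omega, h1.1⟩
        simp only [pvDropFem, if_pos this]
        congr 1
        
      have htake : ((d :: t).filter (fun d => d.1 == 0)).take (20 - f.length)
          = d :: (t.filter (fun d => d.1 == 0)).take (20 - (f.length + 1)) := by
        have hfil : (d :: t).filter (fun d => d.1 == 0) = d :: t.filter (fun d => d.1 == 0) := by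
          simp [h1.1]
        rw [hfil]
        have : 20 - f.length = (20 - (f.length + 1)) + 1 := by omega
        rw [this, List.take_succ_cons]
      simp [htake, hdrop]
    · rw [if_neg h1]
      have hfil : ((d :: t).filter (fun d => d.1 == 0)).take (20 - f.length)
          = (t.filter (fun d => d.1 == 0)).take (20 - f.length) := by
        by_cases hd : d.1 = 0
        · have hf20 : f.length = 20 := by omega
          simp [hf20]
        · simp [hd]
      have hdrop : pvDropFem (d :: t) (20 - f.length) [] = d :: pvDropFem t (20 - f.length) [] := by
        have hcond : ¬ (0 < 20 - f.length ∧ d.1 = 0) := by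
          intro ⟨ha, hb⟩; exact h1 ⟨hb, by omega⟩
        simp only [pvDropFem, if_neg hcond]
        rw [pvDropFem_out]; simp
      by_cases h2 : m.length < 20
      · rw [if_pos h2, ih f (m ++ [d]) hf (by simp; omega), hfil, hdrop]
        have : 20 - m.length = (20 - (m.length + 1)) + 1 := by omega
        rw [this, List.take_succ_cons]
        simp
      · rw [if_neg h2]
        have hm20 : m.length = 20 := by omega
        have htk0 : (20 : Nat) - m.length = 0 := by omega
        by_cases h3 : m.length = 20 ∧ f.length = 20
        · rw [if_pos h3]
          have : 20 - f.length = 0 := by omega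
          simp [this, htk0]
        · rw [if_neg h3, ih f m hf hm, hfil, htk0]; simp

-- ===== VERDICT (by name: the statement is the Claim_ definition above) =====
theorem select_new_gen_spec : Claim_equal_select_new_gen := by
  intro dogs _
  unfold Spec_select_new_gen select_new_gen select_new_gen_alt
  rw [pvLoopA_eq _ [] [] (by simp) (by simp)]
  simp
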